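-- pv_equiv track=rewrite | github.com/mideind/GreynirSeq | src/greynirseq/nicenlp/data/masked_byte_sequence.py | space_separated_offsets
-- ===== SOURCE A (Python) =====
-- def space_separated_offsets(text):
--     last = None
--     word_offsets = []
--     for idx, char in enumerate(text):
--         if char != " " and (last == " " or last is None):
--             word_offsets.append(idx)
--         last = char
--     return word_offsets
-- ===== SOURCE B (Python) =====
-- import re
--
-- def space_separated_offsets(text):
--     return [m.start() for m in re.finditer(r"[^ ]+", text)]
-- ===== Notes on version B (the rewrite author's own statement) =====
-- stated objective: idiomatic
-- what changed: Replaces the stateful previous-character loop with a regex scan over maximal runs of non-space characters, collecting each match's start offset.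
import Mathlib
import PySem

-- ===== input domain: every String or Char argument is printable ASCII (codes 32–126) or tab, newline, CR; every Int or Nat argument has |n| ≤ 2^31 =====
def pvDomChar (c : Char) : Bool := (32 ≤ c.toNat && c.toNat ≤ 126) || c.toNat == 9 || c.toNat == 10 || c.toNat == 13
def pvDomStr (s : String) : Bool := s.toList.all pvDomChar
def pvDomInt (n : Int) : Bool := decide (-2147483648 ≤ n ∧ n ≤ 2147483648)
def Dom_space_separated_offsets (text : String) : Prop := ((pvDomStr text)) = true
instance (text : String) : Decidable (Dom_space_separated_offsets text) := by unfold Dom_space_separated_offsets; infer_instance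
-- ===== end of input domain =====

-- B replaces A's previous-character tracking loop with a scan over maximal non-space runs
-- (Python B uses re.finditer(r"[^ ]+")), collecting each run's start offset; idiomatic, same cost.


-- ===== PORT A =====
-- the for-loop of A: state = (last : Option Char) carried through, offsets accumulated in order
def pvLoopA : List Char → Int → Option Char → List Int → List Int
  | [], _, _, acc => acc
  | c :: rest, idx, last, acc =>
    pvLoopA rest (idx + 1) (some c)
      (if c ≠ ' ' ∧ (last = some ' ' ∨ last = none) then acc ++ [idx] else acc)

def space_separated_offsets (text : String) : List Int :=
  pvLoopA text.toList 0 none []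

-- ===== PORT B =====
-- regex scan [^ ]+ : skip spaces; at a non-space, record the offset and jump past the maximal run
def pvRunsB (cs : List Char) (i : Int) : List Int :=
  match cs with
  | [] => []
  | c :: rest =>
    if c = ' ' then pvRunsB rest (i + 1)
    else i :: pvRunsB (rest.dropWhile (· ≠ ' ')) (i + 1 + (rest.takeWhile (· ≠ ' ')).length)
termination_by cs.length
decreasing_by
  · simp
  · have := List.length_dropWhile_le (p := fun c => decide (c ≠ ' ')) (l := rest)
    simp at this ⊢; omega

def space_separated_offsets_alt (text : String) : List Int :=
  pvRunsB text.toList 0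

-- ===== PRECONDITION & SPEC =====
def Spec_space_separated_offsets (text : String) (out : List Int) : Prop := out = space_separated_offsets_alt text
instance (text : String) (out : List Int) : Decidable (Spec_space_separated_offsets text out) := by unfold Spec_space_separated_offsets; infer_instance

-- ===== CLAIM (what is proved, stated in full; the proofs are below) =====
def Claim_equal_space_separated_offsets : Prop := ∀ (text : String), Dom_space_separated_offsets text → Spec_space_separated_offsets text (space_separated_offsets text)

-- ===== LEMMAS AND PROOFS =====

-- combined invariant: at a word boundary A's loop yields the runs of the remainder;
-- inside a word it yields the runs after the current run ends
theorem pvLoop_inv : ∀ (cs : List Char),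
    (∀ (i : Int) (acc : List Int) (last : Option Char), (last = some ' ' ∨ last = none) →
      pvLoopA cs i last acc = acc ++ pvRunsB cs i) ∧
    (∀ (i : Int) (acc : List Int) (c : Char), c ≠ ' ' →
      pvLoopA cs i (some c) acc
        = acc ++ pvRunsB (cs.dropWhile (· ≠ ' ')) (i + (cs.takeWhile (· ≠ ' ')).length)) := by
  intro cs
  induction cs with
  | nil => simp [pvLoopA, pvRunsB]
  | cons c' rest ih =>
    constructor
    · intro i acc last hlast
      by_cases h : c' = ' '
      · subst h
        have hcond : ¬ (' ' ≠ ' ' ∧ (last = some ' ' ∨ last = none)) := by simp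
        simp only [pvLoopA, if_neg hcond, pvRunsB]
        exact (ih.1 (i + 1) acc (some ' ') (Or.inl rfl))
      · have hcond : (c' ≠ ' ' ∧ (last = some ' ' ∨ last = none)) := ⟨h, hlast⟩
        simp only [pvLoopA, if_pos hcond, pvRunsB, if_neg h]
        rw [ih.2 (i + 1) (acc ++ [i]) c' h]
        simp [add_assoc]
    · intro i acc c hc
      by_cases h : c' = ' '
      · subst h
        have hcond : ¬ (' ' ≠ ' ' ∧ (some c = some ' ' ∨ some c = none)) := by simp
        simp only [pvLoopA, if_neg hcond]
        rw [ih.1 (i + 1) acc (some ' ') (Or.inl rfl)]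
        simp [List.dropWhile, List.takeWhile, pvRunsB]
      · have hcond : ¬ (c' ≠ ' ' ∧ (some c = some ' ' ∨ some c = none)) := by
          simp [hc]
        simp only [pvLoopA, if_neg hcond]
        rw [ih.2 (i + 1) acc c' h]
        simp [List.dropWhile, List.takeWhile, h]
        ring_nf

-- ===== VERDICT (by name: the statement is the Claim_ definition above) =====
theorem space_separated_offsets_spec : Claim_equal_space_separated_offsets := by
  intro text _
  unfold Spec_space_separated_offsets space_separated_offsets space_separated_offsets_alt
  simpa using (pvLoop_inv text.toList).1 0 [] none (Or.inr rfl)
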